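-- pv_equiv track=rewrite | github.com/Fairgrove/giga-forge | simulator/weighted_options.py | generate_reforge_table
-- ===== SOURCE A (Python) =====
-- unreforgable_stats = [
--         'ITEM_MOD_STAMINA_SHORT',
--         'ITEM_MOD_AGILITY_SHORT',
--         'ITEM_MOD_INTELLECT_SHORT',
--         'ITEM_MOD_STRENGTH_SHORT',
--         'power',
--         'resilience',
--         ]
--
-- def generate_reforge_table(item, caps, weights):
--     caps_list = [d["name"] for d in caps if "name" in d]
--     item_stats = list(item['stats'].keys())
--
--     result = {}
--
--     first_stat = True
--     for stat, value in item['stats'].items():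
--         result[stat] = []
--
--         if first_stat:
--             result[stat].append(None)
--             first_stat = False
--
--         #find the best dst for this src
--         best_val = 0
--         best_stat = None
--         for weight_stat, weight_value in weights.items():
--             if weight_stat in item_stats:
--                 continue
--
--             if weight_value == weights[stat]:
--                 continue
--
--             if weight_stat in unreforgable_stats:
--                 continue
--
--             if weight_value < weights[stat] and weight_stat not in caps_list:
--                 continue
--
--             if weight_value > best_val:
--                 best_val = weight_value
--                 best_stat = weight_stat
--
--         if best_stat:
--             result[stat].append(best_stat)
--
--         for cap_stat in caps_list:
--             if not cap_stat in item_stats: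
--                 result[stat].append(cap_stat)
--
--     return result
-- ===== SOURCE B (Python) =====
-- unreforgable_stats = [
--         'ITEM_MOD_STAMINA_SHORT',
--         'ITEM_MOD_AGILITY_SHORT',
--         'ITEM_MOD_INTELLECT_SHORT',
--         'ITEM_MOD_STRENGTH_SHORT',
--         'power',
--         'resilience',
--         ]
--
-- def generate_reforge_table(item, caps, weights):
--     caps_list = [d["name"] for d in caps if "name" in d]
--     stats = item['stats']
--     item_stats = set(stats)
--     caps_set = set(caps_list)
--     bad = set(unreforgable_stats)
--     # stable descending order by weight: the first eligible entry is the
--     # best destination with the same tie-break as a running-max scan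
--     order = sorted(weights.items(), key=lambda kv: kv[1], reverse=True)
--     cap_tail = [c for c in caps_list if c not in item_stats]
--
--     result = {}
--     for i, stat in enumerate(stats):
--         w0 = weights.get(stat, 0)
--         best = next((k for k, v in order
--                      if v > 0 and k not in item_stats and v != w0
--                      and k not in bad and (v > w0 or k in caps_set)), None)
--         row = [None] if i == 0 else []
--         if best:
--             row.append(best)
--         row.extend(cap_tail)
--         result[stat] = row
--     return result
-- ===== Notes on version B (the rewrite author's own statement) =====
-- stated objective: alternative
-- what changed: B sorts the weight entries once (stable, descending by weight) and per stat takes the FIRST eligible entry of that order instead of A's per-stat running-max accumulator scan; membership sets and the cap tail are precomputed once.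
import Mathlib
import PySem

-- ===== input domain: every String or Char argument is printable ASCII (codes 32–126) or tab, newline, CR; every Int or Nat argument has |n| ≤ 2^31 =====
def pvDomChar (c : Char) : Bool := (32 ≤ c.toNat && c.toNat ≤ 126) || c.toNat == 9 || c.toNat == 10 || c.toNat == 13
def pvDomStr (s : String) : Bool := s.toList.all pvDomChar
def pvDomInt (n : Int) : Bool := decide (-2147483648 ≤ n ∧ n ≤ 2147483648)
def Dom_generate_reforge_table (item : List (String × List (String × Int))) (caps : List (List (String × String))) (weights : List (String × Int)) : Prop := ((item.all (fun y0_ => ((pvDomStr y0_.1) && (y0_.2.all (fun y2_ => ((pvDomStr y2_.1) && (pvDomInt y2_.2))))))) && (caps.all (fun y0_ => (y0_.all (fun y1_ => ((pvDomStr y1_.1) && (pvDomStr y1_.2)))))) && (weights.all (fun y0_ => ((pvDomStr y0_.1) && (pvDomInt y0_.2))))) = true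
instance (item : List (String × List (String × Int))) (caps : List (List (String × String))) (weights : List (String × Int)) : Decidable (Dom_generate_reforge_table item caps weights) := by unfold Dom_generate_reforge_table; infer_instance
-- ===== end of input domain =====

-- B sorts the weight entries once (stable, descending by weight) and per stat takes the first
-- eligible entry of that order, instead of A's per-stat running-max accumulator scan
-- (objective: alternative algorithm, same per-stat asymptotic cost).

-- ===== PORT A =====
-- module constant unreforgable_stats (shared by both Pythons)
def pvUnreforgable : List String :=
  ["ITEM_MOD_STAMINA_SHORT", "ITEM_MOD_AGILITY_SHORT", "ITEM_MOD_INTELLECT_SHORT",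
   "ITEM_MOD_STRENGTH_SHORT", "power", "resilience"]

-- the body of A's outer loop for one stat: the best-destination scan and the row it appends
def pvRowA (capsList itemStats : List String) (wd : PySem.Dict String Int)
    (stat : String) (first : Bool) : List (Option String) :=
  let w0 := wd.getD stat 0            -- weights[stat]; only reached under Pre_ with the key present
  let best := wd.items.foldl (fun (bb : Int × Option String) (w : String × Int) =>
      if itemStats.contains w.1 then bb
      else if w.2 == w0 then bb
      else if pvUnreforgable.contains w.1 then bb
      else if w.2 < w0 && !(capsList.contains w.1) then bb
      else if bb.1 < w.2 then (w.2, some w.1) else bb)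
    ((0 : Int), (none : Option String))
  (if first then [(none : Option String)] else []) ++
  (match best.2 with                   -- Python 'if best_stat:' — None and "" are falsy
   | some s => if s == "" then [] else [some s]
   | none => []) ++
  (capsList.filter (fun c => !(itemStats.contains c))).map some

def generate_reforge_table (item : List (String × List (String × Int))) (caps : List (List (String × String))) (weights : List (String × Int)) : List (String × List (Option String)) :=
  let capsList := caps.filterMap (fun d => (PySem.Dict.ofList d).get? "name")
  let stats := PySem.Dict.ofList ((PySem.Dict.ofList item).getD "stats" [])  -- item['stats']; Pre_ guarantees the key
  let wd := PySem.Dict.ofList weights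
  (stats.items.foldl
    (fun (st : PySem.Dict String (List (Option String)) × Bool) (p : String × Int) =>
      (st.1.insert p.1 (pvRowA capsList stats.keys wd p.1 st.2), false))
    (PySem.Dict.empty, true)).1.items

-- ===== PORT B =====
-- the generator's filter: v > 0 and k not in item_stats and v != w0 and k not in bad and (v > w0 or k in caps_set)
def pvQ (itemSet capsSet : PySem.Set String) (w0 : Int) (w : String × Int) : Bool :=
  !(PySem.Set.contains itemSet w.1) && w.2 != w0 &&
    !(PySem.Set.contains (PySem.Set.ofList pvUnreforgable) w.1) &&
    (w.2 > w0 || PySem.Set.contains capsSet w.1)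

def pvEligB (itemSet capsSet : PySem.Set String) (w0 : Int) (w : String × Int) : Bool :=
  0 < w.2 && pvQ itemSet capsSet w0 w

-- the body of B's loop: first eligible entry of the sorted order, then the cap tail
def pvRowB (itemSet capsSet : PySem.Set String) (wd : PySem.Dict String Int)
    (order : List (String × Int)) (capTail : List String) (stat : String) (isFirst : Bool) :
    List (Option String) :=
  let w0 := wd.getD stat 0             -- weights.get(stat, 0)
  let best := (order.find? (pvEligB itemSet capsSet w0)).map (·.1)   -- next(..., None)
  (if isFirst then [(none : Option String)] else []) ++
  (match best with                     -- Python 'if best:' — None and "" are falsy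
   | some s => if s == "" then [] else [some s]
   | none => []) ++ capTail.map some

def generate_reforge_table_alt (item : List (String × List (String × Int))) (caps : List (List (String × String))) (weights : List (String × Int)) : List (String × List (Option String)) :=
  let capsList := caps.filterMap (fun d => (PySem.Dict.ofList d).get? "name")
  let stats := PySem.Dict.ofList ((PySem.Dict.ofList item).getD "stats" [])
  let itemSet := PySem.Set.ofList stats.keys
  let capsSet := PySem.Set.ofList capsList
  let wd := PySem.Dict.ofList weights
  let order := PySem.List.sorted wd.items (·.2) true   -- sorted(weights.items(), key=..., reverse=True)
  let capTail := capsList.filter (fun c => !(PySem.Set.contains itemSet c))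
  (PySem.List.enumerate stats.items).map
    (fun ip => (ip.2.1, pvRowB itemSet capsSet wd order capTail ip.2.1 (ip.1 == 0)))

-- ===== PRECONDITION & SPEC =====
-- Pre_ excludes exactly the inputs on which Python A raises KeyError: item without a 'stats' key,
-- or some item stat missing from weights while some weight key lies outside the item stats
-- (there the inner loop reaches weights[stat]).
def Pre_generate_reforge_table (item : List (String × List (String × Int))) (caps : List (List (String × String))) (weights : List (String × Int)) : Prop :=
  (PySem.Dict.ofList item).contains "stats" = true ∧
  ((∀ k ∈ (PySem.Dict.ofList ((PySem.Dict.ofList item).getD "stats" [])).keys,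
      (PySem.Dict.ofList weights).contains k = true) ∨
   (∀ k ∈ (PySem.Dict.ofList weights).keys,
      (PySem.Dict.ofList ((PySem.Dict.ofList item).getD "stats" [])).keys.contains k = true))
instance (item : List (String × List (String × Int))) (caps : List (List (String × String))) (weights : List (String × Int)) : Decidable (Pre_generate_reforge_table item caps weights) := by unfold Pre_generate_reforge_table; infer_instance

def pvWitness_generate_reforge_table : (List (String × List (String × Int))) × (List (List (String × String))) × (List (String × Int)) :=
  ([("stats", [("a", 1)])], [[("name", "b")]], [("a", 1), ("b", 3)])

def Spec_generate_reforge_table (item : List (String × List (String × Int))) (caps : List (List (String × String))) (weights : List (String × Int)) (out : List (String × List (Option String))) : Prop := out = generate_reforge_table_alt item caps weights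
instance (item : List (String × List (String × Int))) (caps : List (List (String × String))) (weights : List (String × Int)) (out : List (String × List (Option String))) : Decidable (Spec_generate_reforge_table item caps weights out) := by unfold Spec_generate_reforge_table; infer_instance

-- ===== CLAIM (what is proved, stated in full; the proofs are below) =====
def Claim_equal_generate_reforge_table : Prop := ∀ (item : List (String × List (String × Int))) (caps : List (List (String × String))) (weights : List (String × Int)), Dom_generate_reforge_table item caps weights → Pre_generate_reforge_table item caps weights → Spec_generate_reforge_table item caps weights (generate_reforge_table item caps weights)

-- ===== LEMMAS AND PROOFS =====

-- ---- max? plumbing (A's running max) ----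
def pvMaxStep (acc : Option Int) (x : Int) : Option Int :=
  match acc with
  | none => some x
  | some m => if m < x then some x else some m

lemma pv_max?_eq (vs : List Int) :
    PySem.List.max? vs (fun x => x) = vs.foldl pvMaxStep none := by
  unfold PySem.List.max? pvMaxStep
  congr 1
  funext acc x
  cases acc <;> rfl

lemma pv_max?_acc (vs : List Int) (a : Int) :
    vs.foldl pvMaxStep (some a) = some (vs.foldl max a) := by
  induction vs generalizing a with
  | nil => rfl
  | cons x t ih =>
    simp only [List.foldl_cons, pvMaxStep]
    rw [show (if a < x then some x else some a) = some (max a x) by split <;> simp <;> omega]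
    exact ih (max a x)

lemma pv_max?_cons (vs : List Int) (a : Int) :
    PySem.List.max? (a :: vs) (fun x => x) = some (vs.foldl max a) := by
  rw [pv_max?_eq, List.foldl_cons]
  exact pv_max?_acc vs a

lemma pv_max?_nil : PySem.List.max? ([] : List Int) (fun x => x) = none := rfl

lemma pv_foldl_max_cases (vs : List Int) (a : Int) :
    vs.foldl max a = match PySem.List.max? vs (fun x => x) with
      | none => a
      | some m => max a m := by
  cases vs with
  | nil => rfl
  | cons x t =>
    rw [pv_max?_cons, List.foldl_cons, List.foldl_assoc]

lemma pv_max?_eq_none_iff (vs : List Int) :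
    PySem.List.max? vs (fun x => x) = none ↔ vs = [] := by
  cases vs with
  | nil => simp [pv_max?_nil]
  | cons a t => rw [pv_max?_cons]; simp

lemma pv_max?_mem (vs : List Int) (m : Int) (h : PySem.List.max? vs (fun x => x) = some m) :
    m ∈ vs := by
  induction vs with
  | nil => simp [pv_max?_nil] at h
  | cons a t ih =>
    rw [pv_max?_cons] at h
    cases t with
    | nil => simp at h; simp [h]
    | cons b t' =>
      rw [List.foldl_cons, List.foldl_assoc] at h
      rw [pv_max?_cons] at ih
      rcases max_cases a (t'.foldl max b) with ⟨he, _⟩ | ⟨he, _⟩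
      · rw [he] at h; simp at h; simp [h]
      · rw [he] at h
        have := ih h
        simp at this ⊢
        tauto

-- ---- A's accumulator scan, characterised ----
lemma pv_foldBest (q : String × Int → Bool) (l : List (String × Int)) (bv : Int) (bs : Option String) :
    l.foldl (fun (bb : Int × Option String) w =>
        if q w && bb.1 < w.2 then (w.2, some w.1) else bb) (bv, bs)
    = match PySem.List.max? ((l.filter q).map (·.2)) (fun v => v) with
      | none => (bv, bs)
      | some m => if bv < m then (m, ((l.filter q).find? (fun w => w.2 == m)).map (·.1)) else (bv, bs) := by
  induction l generalizing bv bs with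
  | nil => rfl
  | cons w t ih =>
    cases hq : q w with
    | false =>
      rw [List.foldl_cons, if_neg (by simp [hq]), List.filter_cons_of_neg (by simp [hq])]
      exact ih bv bs
    | true =>
      rw [List.filter_cons_of_pos hq, List.map_cons, pv_max?_cons, pv_foldl_max_cases]
      rcases lt_or_ge bv w.2 with hlt | hge
      · rw [List.foldl_cons, if_pos (by simp [hq, hlt]), ih]
        cases hm : PySem.List.max? ((t.filter q).map (·.2)) (fun v => v) with
        | none =>
          have hfil : t.filter q = [] := by
            have := (pv_max?_eq_none_iff _).mp hm
            simpa using this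
          simp only [hfil, List.find?_cons, beq_self_eq_true]
          simp [hlt]
        | some m =>
          by_cases h2 : w.2 < m
          · simp only [max_eq_right (le_of_lt h2)]
            rw [if_pos h2, if_pos (lt_trans hlt h2),
              List.find?_cons_of_neg (by simp; omega)]
          · simp only [max_eq_left (by omega : m ≤ w.2)]
            rw [if_neg h2, if_pos hlt, List.find?_cons_of_pos (by simp)]
            simp
      · rw [List.foldl_cons, if_neg (by simp; omega), ih]
        cases hm : PySem.List.max? ((t.filter q).map (·.2)) (fun v => v) with
        | none =>
          simp only []
          rw [if_neg (by omega)]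
        | some m =>
          by_cases h2 : bv < m
          · have hw2m : w.2 < m := by omega
            simp only [max_eq_right (le_of_lt hw2m)]
            rw [if_pos h2, if_pos h2, List.find?_cons_of_neg (by simp; omega)]
          · simp only []
            rw [if_neg h2, if_neg (not_lt.mpr (max_le (by omega) (by omega)))]

lemma pv_set_contains (xs : List String) (y : String) :
    PySem.Set.contains (PySem.Set.ofList xs) y = xs.contains y := by
  by_cases h : y ∈ xs <;>
    simp [PySem.Set.contains_eq_listContains, h, PySem.Set.mem_ofList]

-- A's step function is the running-max update guarded by B's filter pvQ
lemma pv_step_eq (capsList keys : List String) (w0 : Int) :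
    (fun (bb : Int × Option String) (w : String × Int) =>
      if keys.contains w.1 then bb
      else if w.2 == w0 then bb
      else if pvUnreforgable.contains w.1 then bb
      else if w.2 < w0 && !(capsList.contains w.1) then bb
      else if bb.1 < w.2 then (w.2, some w.1) else bb)
    = (fun bb w =>
      if pvQ (PySem.Set.ofList keys) (PySem.Set.ofList capsList) w0 w && bb.1 < w.2
      then (w.2, some w.1) else bb) := by
  funext bb w
  simp only [pvQ, pv_set_contains]
  cases h1 : keys.contains w.1 <;>
  cases h4 : capsList.contains w.1 <;>
  cases h3 : pvUnreforgable.contains w.1 <;>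
  by_cases h2 : w.2 = w0 <;>
  by_cases h5 : w.2 < w0 <;>
  by_cases h6 : bb.1 < w.2 <;>
    simp [h2, h5, h6, bne_iff_ne] <;>
    omega

-- ---- the stable descending sort, characterised ----

lemma pv_insertBy_eq (bef : (String × Int) → (String × Int) → Bool) (x : String × Int) :
    ∀ s : List (String × Int),
      PySem.List.insertBy bef x s
        = s.takeWhile (fun y => !(bef x y)) ++ x :: s.dropWhile (fun y => !(bef x y)) := by
  intro s
  induction s with
  | nil => rfl
  | cons y t ih =>
    simp only [PySem.List.insertBy]
    cases hb : bef x y with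
    | true => simp [hb]
    | false =>
      simp only [List.takeWhile_cons, List.dropWhile_cons, hb]
      simpa using ih

lemma pv_dropWhile_lt (x2 : Int) :
    ∀ s : List (String × Int), s.Pairwise (fun a b => b.2 ≤ a.2) →
      ∀ y ∈ s.dropWhile (fun y => !(decide (y.2 < x2))), y.2 < x2 := by
  intro s
  induction s with
  | nil => intro _ y hy; simp at hy
  | cons a t ih =>
    intro hpw y hy
    rcases List.pairwise_cons.mp hpw with ⟨ha, ht⟩
    by_cases hlt : a.2 < x2
    · rw [List.dropWhile_cons_of_neg (by simp [hlt])] at hy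
      rcases List.mem_cons.mp hy with heq | hy
      · rw [heq]; exact hlt
      · exact lt_of_le_of_lt (ha y hy) hlt
    · rw [List.dropWhile_cons_of_pos (by simp [hlt])] at hy
      exact ih ht y hy

-- stability: the sorted order lists the entries of any fixed weight in their original order
lemma pv_filter_sorted (m : Int) :
    ∀ l : List (String × Int),
      (PySem.List.sorted l (·.2) true).filter (fun w => w.2 == m)
        = l.filter (fun w => w.2 == m) := by
  intro l
  induction l using List.reverseRecOn with
  | nil => rfl
  | append_singleton t x ih =>
    have hsort : PySem.List.sorted (t ++ [x]) (·.2) true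
        = PySem.List.insertBy (fun a b => decide (b.2 < a.2)) x (PySem.List.sorted t (·.2) true) := by
      rw [PySem.List.sorted_rev_eq_foldl_insertBy, PySem.List.sorted_rev_eq_foldl_insertBy,
        List.foldl_append, List.foldl_cons, List.foldl_nil]
    rw [hsort, pv_insertBy_eq, List.filter_append, List.filter_cons]
    by_cases hx : x.2 = m
    · have hdrop : ((PySem.List.sorted t (·.2) true).dropWhile
          (fun y => !(decide (y.2 < x.2)))).filter (fun w => w.2 == m) = [] := by
        rw [List.filter_eq_nil_iff]
        intro y hy
        have := pv_dropWhile_lt x.2 _ (PySem.List.sorted_pairwise_rev t (·.2)) y hy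
        simp
        omega
      have hxb : (x.2 == m) = true := by simp [hx]
      simp only [hxb, if_pos]
      have htk : ((PySem.List.sorted t (·.2) true).takeWhile
          (fun y => !(decide (y.2 < x.2)))).filter (fun w => w.2 == m) = t.filter (fun w => w.2 == m) := by
        have h2 := congrArg (List.filter (fun w : String × Int => w.2 == m))
          (List.takeWhile_append_dropWhile (p := fun y : String × Int => !(decide (y.2 < x.2)))
            (l := PySem.List.sorted t (·.2) true))
        rw [List.filter_append, hdrop, List.append_nil, ih] at h2
        exact h2
      rw [htk, List.filter_append, List.filter_cons]
      simp only [hxb, if_pos]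
      simp only [List.filter_eq_nil_iff] at hdrop
      simp
      intro a b hab
      have hlt := pv_dropWhile_lt x.2 _ (PySem.List.sorted_pairwise_rev t (·.2)) (a, b) hab
      simp at hlt
      omega
    · have hxb : (x.2 == m) = false := by simp [hx]
      simp only [hxb, if_neg Bool.false_ne_true]
      have h2 := congrArg (List.filter (fun w : String × Int => w.2 == m))
        (List.takeWhile_append_dropWhile (p := fun y : String × Int => !(decide (y.2 < x.2)))
          (l := PySem.List.sorted t (·.2) true))
      rw [List.filter_append] at h2
      rw [h2, ih, List.filter_append, List.filter_cons]
      simp [hxb]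

-- any entry of the sorted list satisfying the filter weighs at most the first one found
lemma pv_find_is_max (p : (String × Int) → Bool) :
    ∀ s : List (String × Int), s.Pairwise (fun a b => b.2 ≤ a.2) →
      ∀ x y, s.find? p = some x → y ∈ s → p y = true → y.2 ≤ x.2 := by
  intro s
  induction s with
  | nil => intro _ x y hx hy; simp at hy
  | cons a t ih =>
    intro hpw x y hx hy hpy
    rcases List.pairwise_cons.mp hpw with ⟨ha, ht⟩
    rw [List.find?_cons] at hx
    cases hpa : p a with
    | true =>
      rw [hpa] at hx
      injection hx with hx
      rcases List.mem_cons.mp hy with heq | hy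
      · rw [heq, ← hx]
      · rw [← hx]; exact ha y hy
    | false =>
      rw [hpa] at hx
      rcases List.mem_cons.mp hy with heq | hy
      · rw [heq] at hpy; rw [hpy] at hpa; exact absurd hpa (by simp)
      · exact ih ht x y hx hy hpy

-- the entry found is the FIRST entry of its weight class satisfying the raw filter pvQ
lemma pv_find_first_in_class (q : (String × Int) → Bool) :
    ∀ (s : List (String × Int)) (x : String × Int),
      s.find? (fun w => 0 < w.2 && q w) = some x → 0 < x.2 →
      (s.filter (fun w => w.2 == x.2)).find? q = some x := by
  intro s
  induction s with
  | nil => intro x hx; simp at hx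
  | cons a t ih =>
    intro x hx hxpos
    rw [List.find?_cons] at hx
    cases hpa : (0 < a.2 && q a) with
    | true =>
      rw [hpa] at hx
      injection hx with hx; subst hx
      rw [List.filter_cons_of_pos (by simp), List.find?_cons_of_pos (by simp at hpa; simp [hpa.2])]
    | false =>
      rw [hpa] at hx
      by_cases hcls : a.2 = x.2
      · have hqa : q a = false := by
          cases hq : q a
          · rfl
          · exfalso
            have : (0 < a.2 && q a) = true := by simp [hq]; omega
            rw [this] at hpa; exact absurd hpa (by simp)
        rw [List.filter_cons_of_pos (by simp [hcls]), List.find?_cons_of_neg (by simp [hqa])]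
        exact ih x hx hxpos
      · rw [List.filter_cons_of_neg (by simp [hcls])]
        exact ih x hx hxpos

-- the bridge: B's first-eligible-of-the-sorted-order equals A's max-characterised scan
lemma pv_bridge (q : (String × Int) → Bool) (l : List (String × Int)) :
    (PySem.List.sorted l (·.2) true).find? (fun w => 0 < w.2 && q w)
    = match PySem.List.max? ((l.filter q).map (·.2)) (fun v => v) with
      | none => none
      | some m => if 0 < m then (l.filter q).find? (fun w => w.2 == m) else none := by
  have hperm := PySem.List.sorted_perm l (·.2) true
  have hpw := PySem.List.sorted_pairwise_rev l (·.2)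
  cases hm : PySem.List.max? ((l.filter q).map (·.2)) (fun v => v) with
  | none =>
    have hfil : l.filter q = [] := by
      have := (pv_max?_eq_none_iff _).mp hm
      simpa using this
    rw [List.find?_eq_none]
    intro w hw
    have hwl : w ∈ l := hperm.mem_iff.mp hw
    cases hq : q w
    · simp
    · exact absurd (List.mem_filter.mpr ⟨hwl, hq⟩) (by simp [hfil])
  | some m =>
    have hub : ∀ w ∈ l, q w = true → w.2 ≤ m := by
      intro w hw hq
      exact PySem.List.max?_isMax (xs := (l.filter q).map (·.2)) (key := fun v => v) hm w.2
        (List.mem_map.mpr ⟨w, List.mem_filter.mpr ⟨hw, hq⟩, rfl⟩)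
    have hmem : ∃ y ∈ l, q y = true ∧ y.2 = m := by
      rcases List.mem_map.mp (pv_max?_mem _ _ hm) with ⟨y, hy, hy2⟩
      rcases List.mem_filter.mp hy with ⟨hyl, hyq⟩
      exact ⟨y, hyl, hyq, hy2⟩
    by_cases hpos : 0 < m
    · rcases hmem with ⟨y, hyl, hyq, hy2⟩
      have hys : y ∈ PySem.List.sorted l (·.2) true := hperm.mem_iff.mpr hyl
      have hpy : (0 < y.2 && q y) = true := by simp [hyq]; omega
      obtain ⟨x, hx⟩ : ∃ x, (PySem.List.sorted l (·.2) true).find? (fun w => 0 < w.2 && q w) = some x := by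
        have h := (List.find?_isSome (xs := PySem.List.sorted l (·.2) true)
          (p := fun w => 0 < w.2 && q w)).mpr ⟨y, hys, hpy⟩
        exact Option.isSome_iff_exists.mp h
      have hpx := List.find?_some hx
      have hxq : q x = true := by simp at hpx; exact hpx.2
      have hxpos : 0 < x.2 := by simp at hpx; exact hpx.1
      have hxl : x ∈ l := hperm.mem_iff.mp (List.mem_of_find?_eq_some hx)
      have hxle : x.2 ≤ m := hub x hxl hxq
      have hmle : m ≤ x.2 := hy2 ▸ pv_find_is_max _ _ hpw x y hx hys hpy
      have hx2 : x.2 = m := le_antisymm hxle hmle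
      rw [hx]
      simp only [hpos, if_true]
      have h1 : ((PySem.List.sorted l (·.2) true).filter (fun w => w.2 == x.2)).find? q = some x :=
        pv_find_first_in_class q _ x hx hxpos
      rw [pv_filter_sorted] at h1
      rw [List.find?_filter] at h1
      rw [List.find?_filter]
      rw [show (fun w : String × Int => decide (q w = true ∧ (w.2 == m) = true))
            = (fun w : String × Int => decide ((w.2 == x.2) = true ∧ q w = true)) by
          funext w; rw [hx2]; simp [and_comm]]
      exact h1.symm
    · simp only [hpos, if_false]
      rw [List.find?_eq_none]
      intro w hw
      have hwl : w ∈ l := hperm.mem_iff.mp hw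
      cases hq : q w
      · simp
      · have := hub w hwl hq
        simp
        omega

-- the bridge specialised to the scrutinees of the two rows
lemma pv_best_opt (i c : PySem.Set String) (w0 : Int) (l : List (String × Int)) :
    (match (match PySem.List.max? ((l.filter (pvQ i c w0)).map (fun w : String × Int => w.2)) (fun v => v) with
        | none => ((0 : Int), (none : Option String))
        | some m => if (0 : Int) < m then
              (m, ((l.filter (pvQ i c w0)).find? (fun w : String × Int => w.2 == m)).map (fun w : String × Int => w.1))
            else ((0 : Int), (none : Option String))).2 with
      | some s => if s == "" then [] else [some s]
      | none => ([] : List (Option String)))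
    = (match ((PySem.List.sorted l (·.2) true).find? (pvEligB i c w0)).map (fun w : String × Int => w.1) with
      | some s => if s == "" then [] else [some s]
      | none => ([] : List (Option String))) := by
  have hb := pv_bridge (pvQ i c w0) l
  have he : pvEligB i c w0 = fun w => 0 < w.2 && pvQ i c w0 w := by
    funext w; rfl
  rw [he, hb]
  cases hm : PySem.List.max? ((l.filter (pvQ i c w0)).map (·.2)) (fun v => v) with
  | none => rfl
  | some m =>
    by_cases h0 : (0 : Int) < m
    · simp only [h0, if_true]
    · simp only [h0, if_false]
      rfl

-- the two loop bodies agree for every stat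
lemma pv_row_eq (capsList keys : List String) (wd : PySem.Dict String Int) (stat : String) (b : Bool) :
    pvRowA capsList keys wd stat b
    = pvRowB (PySem.Set.ofList keys) (PySem.Set.ofList capsList) wd
        (PySem.List.sorted wd.items (·.2) true)
        (capsList.filter (fun c => !(PySem.Set.contains (PySem.Set.ofList keys) c))) stat b := by
  simp only [pvRowA, pvRowB, pv_step_eq, pv_set_contains]
  rw [pv_foldBest]
  rw [pv_best_opt (PySem.Set.ofList keys) (PySem.Set.ofList capsList) (wd.getD stat 0) wd.items]

lemma pv_foldl_false (capsList keys : List String) (wd : PySem.Dict String Int) (rest : List (String × Int))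
    (d : PySem.Dict String (List (Option String))) :
    rest.foldl (fun st p => (st.1.insert p.1 (pvRowA capsList keys wd p.1 st.2), false)) (d, false)
    = (rest.foldl (fun d p => d.insert p.1 (pvRowA capsList keys wd p.1 false)) d, false) := by
  induction rest generalizing d with
  | nil => rfl
  | cons p rest ih => simp only [List.foldl_cons]; exact ih _

lemma pv_enum_map {α β : Type} (f : Int × α → β) (hf : ∀ k p, k ≠ 0 → f (k, p) = f (1, p)) :
    ∀ (l : List α) (k : Int), 0 < k →
      (PySem.List.enumerate l k).map f = l.map (fun p => f (1, p)) := by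
  intro l
  induction l with
  | nil => intro k _; rfl
  | cons x t ih =>
    intro k hk
    simp only [PySem.List.enumerate, List.map_cons]
    rw [hf k x (by omega)]
    rw [ih (k + 1) (by omega)]

lemma pv_main (item : List (String × List (String × Int))) (caps : List (List (String × String))) (weights : List (String × Int)) :
    generate_reforge_table item caps weights = generate_reforge_table_alt item caps weights := by
  unfold generate_reforge_table generate_reforge_table_alt
  have hnd : (PySem.Dict.ofList ((PySem.Dict.ofList item).getD "stats" [])).keys.Nodup :=
    PySem.Dict.nodup_keys_ofList _
  generalize hcl : caps.filterMap (fun d => (PySem.Dict.ofList d).get? "name") = capsList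
  generalize hst : PySem.Dict.ofList ((PySem.Dict.ofList item).getD "stats" []) = stats
  generalize hwd : PySem.Dict.ofList weights = wd
  rw [hst] at hnd
  have hkeys : stats.keys = stats.items.map (·.1) := rfl
  cases hitems : stats.items with
  | nil =>
    simp [hitems, hkeys]
    rfl
  | cons p rest =>
    have hnd' : ((p :: rest).map (·.1)).Nodup := by
      rw [hkeys, hitems] at hnd; exact hnd
    dsimp only
    rw [hitems, List.foldl_cons]
    simp only []
    rw [pv_foldl_false]
    have hfresh : ∀ a ∈ rest, (PySem.Dict.empty.insert p.1 (pvRowA capsList stats.keys wd p.1 true)).contains a.1 = false := by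
      intro a ha
      rw [PySem.Dict.contains_insert]
      simp only [PySem.Dict.contains_empty, Bool.or_false]
      have hne : a.1 ≠ p.1 := by
        rcases List.nodup_cons.mp hnd' with ⟨hp, _⟩
        intro h
        have hmem : a.1 ∈ List.map (fun x => x.1) rest := List.mem_map.mpr ⟨a, ha, rfl⟩
        rw [h] at hmem
        exact hp hmem
      simpa using hne
    have hndrest : (rest.map (·.1)).Nodup := (List.nodup_cons.mp hnd').2
    rw [PySem.Dict.items_foldl_insert_fresh rest (·.1) (fun a => pvRowA capsList stats.keys wd a.1 false) _ hfresh hndrest]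
    simp only [PySem.List.enumerate, List.map_cons]
    rw [show (0:Int) + 1 = 1 by norm_num]
    rw [pv_enum_map _ (by intro k q hk; rw [beq_eq_false_iff_ne.mpr hk]; simp) rest 1 (by omega)]
    have hitemsd : (PySem.Dict.empty.insert p.1 (pvRowA capsList stats.keys wd p.1 true)).items
        = [(p.1, pvRowA capsList stats.keys wd p.1 true)] := by
      simp [PySem.Dict.items_insert_of_not_contains, PySem.Dict.contains_empty]
      rfl
    rw [hitemsd]
    simp only [List.cons_append, List.nil_append]
    congr 1
    · simp [pv_row_eq]
    · apply List.map_congr_left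
      intro a _
      simp [pv_row_eq]

-- ===== VERDICT (by name: the statement is the Claim_ definition above) =====
theorem generate_reforge_table_spec : Claim_equal_generate_reforge_table := by
  intro item caps weights _ _
  exact pv_main item caps weights
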